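-- pv_equiv track=rewrite | github.com/joaquinpizarro1/Exactas_Programa | Deforastacion.py | propagacion
-- ===== SOURCE A (Python) =====
-- def propagacion(bosque):
--     for i in range(0, len(bosque)):
--         a = -1
--         while bosque[i] == a:
--             if i >= 1:
--                 if bosque[i-1] == 1:
--                     bosque[i-1] = -1
--             if (len(bosque)-2) >= i:
--                 if bosque[i+1] == 1:
--                     bosque[i+1] = -1
--             a = 0
--     return bosque
-- ===== SOURCE B (Python) =====
-- def propagacion(bosque):
--     # Pull-based single pass: each 1-cell checks its already-updated left
--     # neighbour (full rightward cascade) and its still-original right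
--     # neighbour (one-step leftward spread). Mutates bosque in place like A.
--     n = len(bosque)
--     for j in range(n):
--         if bosque[j] == 1 and ((j > 0 and bosque[j - 1] == -1)
--                                or (j + 1 < n and bosque[j + 1] == -1)):
--             bosque[j] = -1
--     return bosque
-- ===== Notes on version B (the rewrite author's own statement) =====
-- stated objective: simpler
-- what changed: Replaced A's push-style update (each -1 cell writes -1 into its 1-valued neighbours, via a one-shot while loop and three nested if-guards) by a single pull-style pass in which each 1 cell reads its already-updated left neighbour and still-original right neighbour and sets itself to -1; both mutate the list in place.
import Mathlib
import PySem

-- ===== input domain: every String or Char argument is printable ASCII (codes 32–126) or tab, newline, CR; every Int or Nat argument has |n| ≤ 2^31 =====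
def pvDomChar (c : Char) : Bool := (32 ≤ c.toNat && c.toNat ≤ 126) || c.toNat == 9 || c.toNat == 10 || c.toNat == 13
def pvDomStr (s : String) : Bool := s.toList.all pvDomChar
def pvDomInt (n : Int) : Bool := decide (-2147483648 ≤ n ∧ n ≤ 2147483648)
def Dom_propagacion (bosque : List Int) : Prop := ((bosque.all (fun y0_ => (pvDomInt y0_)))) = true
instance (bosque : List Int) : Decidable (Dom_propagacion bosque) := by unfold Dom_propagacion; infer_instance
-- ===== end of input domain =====

-- B replaces A's push-style neighbour writes by a single pull-style pass (simpler);
-- both Pythons mutate `bosque` in place and return it — the theorems are about the return value.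

-- ===== PORT A =====
-- A's while-loop body, first guarded write: `if i >= 1: if bosque[i-1] == 1: bosque[i-1] = -1`.
def propStepA1 (b : List Int) (i : Nat) : List Int :=
  if 1 ≤ i then (if b.getD (i - 1) 0 = 1 then b.set (i - 1) (-1) else b) else b

-- second guarded write: `if (len(bosque)-2) >= i: if bosque[i+1] == 1: bosque[i+1] = -1`.
def propStepA2 (b : List Int) (i : Nat) : List Int :=
  if i + 2 ≤ b.length then (if b.getD (i + 1) 0 = 1 then b.set (i + 1) (-1) else b) else b

-- Body of A's for-loop. A's `while bosque[i] == a:` runs at most once: the body never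
-- writes index i and ends with `a = 0` while bosque[i] is still -1, so it is an `if`.
-- In-range reads bosque[i±1] coincide with getD here (each read value is only compared
-- to 1 or -1, and the guards are exactly A's).
def propStepA (b : List Int) (i : Nat) : List Int :=
  if b.getD i 0 = -1 then propStepA2 (propStepA1 b i) i else b

def propagacion (bosque : List Int) : List Int :=
  (List.range bosque.length).foldl propStepA bosque

-- ===== PORT B =====
-- Body of B's for-loop: a 1-cell pulls -1 from its (already updated) left neighbour
-- or its (still original) right neighbour.
def propStepB (n : Nat) (b : List Int) (j : Nat) : List Int :=
  if b.getD j 0 = 1 ∧ ((0 < j ∧ b.getD (j - 1) 0 = -1) ∨ (j + 1 < n ∧ b.getD (j + 1) 0 = -1)) then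
    b.set j (-1)
  else b

def propagacion_alt (bosque : List Int) : List Int :=
  (List.range bosque.length).foldl (propStepB bosque.length) bosque

-- ===== PRECONDITION & SPEC =====
def Spec_propagacion (bosque : List Int) (out : List Int) : Prop := out = propagacion_alt bosque
instance (bosque : List Int) (out : List Int) : Decidable (Spec_propagacion bosque out) := by unfold Spec_propagacion; infer_instance

-- ===== CLAIM (what is proved, stated in full; the proofs are below) =====
def Claim_equal_propagacion : Prop := ∀ (bosque : List Int), Dom_propagacion bosque → Spec_propagacion bosque (propagacion bosque)

-- ===== LEMMAS AND PROOFS =====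

lemma pv_getD_set (l : List Int) (m k : Nat) (v : Int) :
    (l.set m v).getD k 0 = if m = k ∧ m < l.length then v else l.getD k 0 := by
  simp only [List.getD_eq_getElem?_getD, List.getElem?_set]
  split_ifs <;> simp_all
  omega

lemma pv_getD_oob (l : List Int) (k : Nat) (h : l.length ≤ k) : l.getD k 0 = 0 := by
  simp [List.getD_eq_getElem?_getD, List.getElem?_eq_none (by omega)]

lemma propStepA1_length (b : List Int) (i : Nat) : (propStepA1 b i).length = b.length := by
  simp only [propStepA1]; split_ifs <;> simp

lemma propStepA2_length (b : List Int) (i : Nat) : (propStepA2 b i).length = b.length := by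
  simp only [propStepA2]; split_ifs <;> simp

lemma propStepA_length (b : List Int) (i : Nat) : (propStepA b i).length = b.length := by
  simp only [propStepA]; split_ifs <;> simp [propStepA2_length, propStepA1_length]

lemma propStepB_length (n : Nat) (b : List Int) (j : Nat) :
    (propStepB n b j).length = b.length := by
  simp only [propStepB]; split_ifs <;> simp

lemma propStepA1_getD (b : List Int) (i k : Nat) :
    (propStepA1 b i).getD k 0 =
      if 1 ≤ i ∧ k = i - 1 ∧ b.getD (i - 1) 0 = 1 then -1 else b.getD k 0 := by
  have h1 : b.getD (i - 1) 0 = 1 → i - 1 < b.length := by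
    intro h; by_contra hc; rw [pv_getD_oob b _ (by omega)] at h; omega
  simp only [propStepA1]
  by_cases c1 : 1 ≤ i
  · by_cases c2 : b.getD (i - 1) 0 = 1
    · rw [if_pos c1, if_pos c2, pv_getD_set]
      by_cases hk : k = i - 1
      · rw [if_pos ⟨hk.symm, h1 c2⟩, if_pos ⟨c1, hk, c2⟩]
      · rw [if_neg (by rintro ⟨he, -⟩; exact hk he.symm),
            if_neg (by rintro ⟨-, he, -⟩; exact hk he)]
    · rw [if_pos c1, if_neg c2, if_neg (by tauto)]
  · rw [if_neg c1, if_neg (by tauto)]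

lemma propStepA2_getD (b : List Int) (i k : Nat) :
    (propStepA2 b i).getD k 0 =
      if i + 2 ≤ b.length ∧ k = i + 1 ∧ b.getD (i + 1) 0 = 1 then -1 else b.getD k 0 := by
  have h2 : b.getD (i + 1) 0 = 1 → i + 1 < b.length := by
    intro h; by_contra hc; rw [pv_getD_oob b _ (by omega)] at h; omega
  simp only [propStepA2]
  by_cases c1 : i + 2 ≤ b.length
  · by_cases c2 : b.getD (i + 1) 0 = 1
    · rw [if_pos c1, if_pos c2, pv_getD_set]
      by_cases hk : k = i + 1
      · rw [if_pos ⟨hk.symm, h2 c2⟩, if_pos ⟨c1, hk, c2⟩]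
      · rw [if_neg (by rintro ⟨he, -⟩; exact hk he.symm),
            if_neg (by rintro ⟨-, he, -⟩; exact hk he)]
    · rw [if_pos c1, if_neg c2, if_neg (by tauto)]
  · rw [if_neg c1, if_neg (by tauto)]

lemma propStepA_getD (a : List Int) (i k : Nat) :
    (propStepA a i).getD k 0 =
      if a.getD i 0 = -1 ∧ 1 ≤ i ∧ k = i - 1 ∧ a.getD (i - 1) 0 = 1 then -1
      else if a.getD i 0 = -1 ∧ i + 2 ≤ a.length ∧ k = i + 1 ∧ a.getD (i + 1) 0 = 1 then -1
      else a.getD k 0 := by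
  simp only [propStepA]
  by_cases c1 : a.getD i 0 = -1
  · have e1 : (propStepA1 a i).getD (i + 1) 0 = a.getD (i + 1) 0 := by
      rw [propStepA1_getD, if_neg (by rintro ⟨h1, h2, -⟩; omega)]
    rw [if_pos c1, propStepA2_getD, propStepA1_length, e1, propStepA1_getD]
    split_ifs <;> simp_all
  · rw [if_neg c1, if_neg (by tauto), if_neg (by tauto)]

lemma propStepB_getD (n : Nat) (b : List Int) (j k : Nat) :
    (propStepB n b j).getD k 0 =
      if b.getD j 0 = 1 ∧
          ((0 < j ∧ b.getD (j - 1) 0 = -1) ∨ (j + 1 < n ∧ b.getD (j + 1) 0 = -1)) ∧ k = j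
      then -1 else b.getD k 0 := by
  have h1 : b.getD j 0 = 1 → j < b.length := by
    intro h; by_contra hc; rw [pv_getD_oob b _ (by omega)] at h; omega
  simp only [propStepB]
  by_cases c1 : b.getD j 0 = 1 ∧
      ((0 < j ∧ b.getD (j - 1) 0 = -1) ∨ (j + 1 < n ∧ b.getD (j + 1) 0 = -1))
  · rw [if_pos c1, pv_getD_set]
    by_cases hk : k = j
    · rw [if_pos ⟨hk.symm, h1 c1.1⟩, if_pos ⟨c1.1, c1.2, hk⟩]
    · rw [if_neg (by rintro ⟨he, -⟩; exact hk he.symm),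
          if_neg (by rintro ⟨-, -, he⟩; exact hk he)]
  · rw [if_neg c1, if_neg (by rintro ⟨hc1, hc2, -⟩; exact c1 ⟨hc1, hc2⟩)]

-- Joint invariant after the first i loop iterations of both programs
-- (a = A's state, b = B's state, orig = the input list).
def pvInv (orig a b : List Int) (i : Nat) : Prop :=
  a.length = orig.length ∧ b.length = orig.length ∧
  (∀ k, k + 1 < i → a.getD k 0 = b.getD k 0) ∧
  (∀ j, i = j + 1 →
    b.getD j 0 = (if a.getD j 0 = 1 ∧ i < orig.length ∧ orig.getD i 0 = -1 then -1
                  else a.getD j 0)) ∧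
  (∀ j, i = j + 1 → i < orig.length →
    a.getD i 0 = (if orig.getD i 0 = 1 ∧ a.getD j 0 = -1 then -1 else orig.getD i 0)) ∧
  (∀ k, i < k → a.getD k 0 = orig.getD k 0) ∧
  (i = 0 → a = orig) ∧
  (∀ k, i ≤ k → b.getD k 0 = orig.getD k 0)

lemma pvInv_step (orig a b : List Int) (i : Nat) (hin : i < orig.length)
    (h : pvInv orig a b i) :
    pvInv orig (propStepA a i) (propStepB orig.length b i) (i + 1) := by
  obtain ⟨hal, hbl, h3, h4, h5, h6, h7, h8⟩ := h
  have hbi : b.getD i 0 = orig.getD i 0 := h8 i (le_refl i)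
  have hbr : b.getD (i + 1) 0 = orig.getD (i + 1) 0 := h8 (i + 1) (by omega)
  have har : a.getD (i + 1) 0 = orig.getD (i + 1) 0 := h6 (i + 1) (by omega)
  -- derived facts about A's current cell
  have hao : a.getD i 0 ≠ -1 → a.getD i 0 = orig.getD i 0 := by
    intro hne
    rcases Nat.eq_zero_or_pos i with hz | hp
    · subst hz; rw [h7 rfl]
    · have h5' := h5 (i - 1) (by omega) hin
      rw [h5'] at hne ⊢
      split_ifs at hne ⊢ with hc
      · exact absurd rfl hne
      · rfl
  have ham : a.getD i 0 = -1 →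
      orig.getD i 0 = -1 ∨ (orig.getD i 0 = 1 ∧ 0 < i ∧ a.getD (i - 1) 0 = -1) := by
    intro he
    rcases Nat.eq_zero_or_pos i with hz | hp
    · left; subst hz; rw [← he, h7 rfl]
    · have h5' := h5 (i - 1) (by omega) hin
      rw [h5'] at he
      split_ifs at he with hc
      · exact Or.inr ⟨hc.1, hp, hc.2⟩
      · exact Or.inl he
  have hbL : 0 < i → (b.getD (i - 1) 0 = -1 ↔
      (a.getD (i - 1) 0 = -1 ∨ (a.getD (i - 1) 0 = 1 ∧ orig.getD i 0 = -1))) := by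
    intro hp
    have h4' := h4 (i - 1) (by omega)
    rw [h4']
    constructor
    · intro he
      split_ifs at he with hc
      · exact Or.inr ⟨hc.1, hc.2.2⟩
      · exact Or.inl he
    · rintro (he | ⟨h1, h2⟩)
      · rw [if_neg (by rintro ⟨hc, -⟩; rw [he] at hc; exact absurd hc (by decide))]; exact he
      · rw [if_pos ⟨h1, hin, h2⟩]
  refine ⟨by rw [propStepA_length, hal], by rw [propStepB_length, hbl], ?_, ?_, ?_, ?_, ?_, ?_⟩
  · -- (C3) prefix agreement up to i
    intro k hk
    rw [propStepB_getD, hbi]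
    by_cases hki : 1 ≤ i ∧ k = i - 1
    · obtain ⟨hp, hkv⟩ := hki
      have h4' := h4 (i - 1) (by omega)
      have h5' := h5 (i - 1) (by omega) hin
      subst hkv
      rw [if_neg (by rintro ⟨-, -, he⟩; omega), propStepA_getD]
      by_cases hfire : a.getD i 0 = -1 ∧ a.getD (i - 1) 0 = 1
      · -- A writes -1 into i-1; B's cell i-1 is already -1
        rw [if_pos ⟨hfire.1, hp, rfl, hfire.2⟩]
        have horig : orig.getD i 0 = -1 := by
          have hx := hfire.1
          rw [h5'] at hx
          split_ifs at hx with hc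
          · rw [hfire.2] at hc; exact absurd hc.2 (by decide)
          · exact hx
        rw [h4', if_pos ⟨hfire.2, hin, horig⟩]
      · -- A leaves i-1 alone; B's cell equals a[i-1]
        rw [if_neg (by rintro ⟨hx, -, -, hy⟩; exact hfire ⟨hx, hy⟩),
            if_neg (by rintro ⟨-, -, he, -⟩; omega), h4']
        split_ifs with hc
        · -- a[i-1]=1 ∧ orig[i]=-1 would give a[i]=-1, hence a fire: contradiction
          exfalso
          have hai : a.getD i 0 = -1 := by
            rw [h5', if_neg (by rintro ⟨-, hd⟩; rw [hc.1] at hd; exact absurd hd (by decide))]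
            exact hc.2.2
          exact hfire ⟨hai, hc.1⟩
        · rfl
    · -- cell strictly left of i-1 (or i = 0): untouched by both
      have hkii : k + 1 < i := by omega
      rw [if_neg (by rintro ⟨-, -, he⟩; omega), propStepA_getD,
          if_neg (by rintro ⟨-, hp, he, -⟩; omega),
          if_neg (by rintro ⟨-, -, he, -⟩; omega)]
      exact h3 k hkii
  · -- (C4) relation between b and a at index i
    intro j hj
    have hji : j = i := by omega
    subst hji
    have haii : (propStepA a j).getD j 0 = a.getD j 0 := by
      rw [propStepA_getD,
          if_neg (by rintro ⟨-, hp, he, -⟩; omega),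
          if_neg (by rintro ⟨-, -, he, -⟩; omega)]
    rw [haii, propStepB_getD, hbi, hbr]
    by_cases hfire : orig.getD j 0 = 1 ∧
        ((0 < j ∧ b.getD (j - 1) 0 = -1) ∨ (j + 1 < orig.length ∧ orig.getD (j + 1) 0 = -1))
    · rw [if_pos ⟨hfire.1, hfire.2, rfl⟩]
      by_cases hα : a.getD j 0 = -1
      · rw [if_neg (by rintro ⟨hc, -⟩; rw [hα] at hc; exact absurd hc (by decide)), hα]
      · have hα1 : a.getD j 0 = 1 := by rw [hao hα]; exact hfire.1
        rcases hfire.2 with ⟨hp, hbl1⟩ | hR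
        · -- left fire: forces a[j] = -1, contradiction
          exfalso
          rcases (hbL hp).mp hbl1 with he | ⟨h1, h2⟩
          · have h5' := h5 (j - 1) (by omega) hin
            exact hα (by rw [h5', if_pos ⟨hfire.1, he⟩])
          · rw [hfire.1] at h2; exact absurd h2 (by decide)
        · rw [if_pos ⟨hα1, hR⟩]
    · rw [if_neg (by rintro ⟨h1, h2, -⟩; exact hfire ⟨h1, h2⟩)]
      by_cases hα : a.getD j 0 = -1
      · rcases ham hα with he | ⟨h1, hp, h2⟩
        · rw [he, hα, if_neg (by rintro ⟨hc, -⟩; exact absurd hc (by decide))]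
        · exact absurd ⟨h1, Or.inl ⟨hp, (hbL hp).mpr (Or.inl h2)⟩⟩ hfire
      · rw [hao hα, if_neg ?_]
        rintro ⟨h1, h2⟩
        exact hfire ⟨h1, Or.inr h2⟩
  · -- (C5) characterisation of a at index i+1
    intro j hj hlt
    have hji : j = i := by omega
    subst hji
    have haii : (propStepA a j).getD j 0 = a.getD j 0 := by
      rw [propStepA_getD,
          if_neg (by rintro ⟨-, hp, he, -⟩; omega),
          if_neg (by rintro ⟨-, -, he, -⟩; omega)]
    rw [haii, propStepA_getD]
    rw [if_neg (by rintro ⟨-, -, he, -⟩; omega)]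
    by_cases hw : a.getD j 0 = -1 ∧ orig.getD (j + 1) 0 = 1
    · rw [if_pos ⟨hw.1, by omega, rfl, by rw [har]; exact hw.2⟩, if_pos ⟨hw.2, hw.1⟩]
    · rw [if_neg (by rintro ⟨h1, -, -, h2⟩; rw [har] at h2; exact hw ⟨h1, h2⟩), har,
          if_neg (by rintro ⟨h1, h2⟩; exact hw ⟨h2, h1⟩)]
  · -- (C6) cells beyond i+1 untouched in A
    intro k hk
    rw [propStepA_getD,
        if_neg (by rintro ⟨-, hp, he, -⟩; omega),
        if_neg (by rintro ⟨-, -, he, -⟩; omega)]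
    exact h6 k (by omega)
  · intro hcon; omega
  · -- (C8) cells from i+1 on untouched in B
    intro k hk
    rw [propStepB_getD, if_neg (by rintro ⟨-, -, he⟩; omega)]
    exact h8 k (by omega)

lemma pvInv_run (orig : List Int) :
    ∀ i, i ≤ orig.length →
      pvInv orig ((List.range i).foldl propStepA orig)
        ((List.range i).foldl (propStepB orig.length) orig) i := by
  intro i
  induction i with
  | zero =>
      intro _
      exact ⟨rfl, rfl, by omega, by omega, by omega, fun _ _ => rfl, fun _ => rfl, fun _ _ => rfl⟩
  | succ m ih =>
      intro hle
      rw [List.range_succ, List.foldl_append, List.foldl_append]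
      exact pvInv_step orig _ _ m (by omega) (ih (by omega))

lemma pvInv_final (orig a b : List Int) (h : pvInv orig a b orig.length) : a = b := by
  obtain ⟨hal, hbl, h3, h4, h5, h6, h7, h8⟩ := h
  apply List.ext_getElem (by rw [hal, hbl])
  intro k hk1 hk2
  have hg : a.getD k 0 = b.getD k 0 := by
    by_cases hc : k + 1 < orig.length
    · exact h3 k hc
    · have hkk : orig.length = k + 1 := by omega
      rw [h4 k hkk, if_neg (by rintro ⟨-, h1, -⟩; omega)]
  rw [List.getD_eq_getElem a 0 hk1, List.getD_eq_getElem b 0 hk2] at hg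
  exact hg

-- ===== VERDICT (by name: the statement is the Claim_ definition above) =====
theorem propagacion_spec : Claim_equal_propagacion := by
  intro bosque _
  show propagacion bosque = propagacion_alt bosque
  exact pvInv_final bosque _ _ (pvInv_run bosque bosque.length (le_refl _))
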